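-- pv_equiv track=rewrite | github.com/arnugroho/skipgram-model | implementasi_newsapi.py | build_training_pairs
-- ===== SOURCE A (Python) =====
-- def build_training_pairs(words, window_size):
--     training_pairs = []
--     for i, target_word in enumerate(words):
--         for j in range(-window_size, window_size + 1):
--             if j == 0 or i + j < 0 or i + j >= len(words):
--                 continue
--             training_pairs.append((target_word, words[i + j]))
--     return training_pairs
-- ===== SOURCE B (Python) =====
-- def build_training_pairs(words, window_size):
--     # Distance-major bucket fill: for each offset distance d, sweep the whole
--     # word list once, dropping each neighbour into its target's context bucket
--     # (left contexts farthest-first, then right contexts nearest-first), and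
--     # finally flatten the buckets into (target, context) pairs.
--     n = len(words)
--     contexts = [[] for _ in range(n)]
--     for d in reversed(range(1, window_size + 1)):
--         for i in range(d, n):
--             contexts[i].append(words[i - d])
--     for d in range(1, window_size + 1):
--         for i in range(n - d):
--             contexts[i].append(words[i + d])
--     return [(words[i], c) for i in range(n) for c in contexts[i]]
-- ===== Notes on version B (the rewrite author's own statement) =====
-- stated objective: alternative
-- what changed: Replaces A's per-target offset loop (range(-w,w+1) with continue guards) by a distance-major algorithm: for each distance d it sweeps the list once appending neighbours into per-target context buckets, then flattens the buckets into pairs.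
import Mathlib
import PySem

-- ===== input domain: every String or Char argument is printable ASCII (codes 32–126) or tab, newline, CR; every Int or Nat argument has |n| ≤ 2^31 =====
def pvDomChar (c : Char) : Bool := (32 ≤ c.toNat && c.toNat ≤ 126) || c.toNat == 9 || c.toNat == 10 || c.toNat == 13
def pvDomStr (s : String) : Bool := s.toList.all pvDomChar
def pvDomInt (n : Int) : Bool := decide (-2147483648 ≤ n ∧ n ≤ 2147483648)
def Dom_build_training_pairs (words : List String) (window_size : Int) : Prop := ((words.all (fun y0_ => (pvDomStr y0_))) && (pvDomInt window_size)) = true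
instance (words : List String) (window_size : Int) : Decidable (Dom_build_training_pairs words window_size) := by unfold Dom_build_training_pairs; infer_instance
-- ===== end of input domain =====

-- B replaces A's per-target offset loop by a distance-major algorithm: one sweep per
-- distance d fills per-target context buckets, which are then flattened (objective: alternative).


-- ===== PORT A =====
def build_training_pairs (words : List String) (window_size : Int) : List (String × String) :=
  (PySem.List.enumerate words).foldl (fun training_pairs p =>
    (PySem.List.pyRange (-window_size) (window_size + 1) 1).foldl (fun training_pairs j =>
      if j = 0 ∨ p.1 + j < 0 ∨ (words.length : Int) ≤ p.1 + j then training_pairs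
      else training_pairs ++ [(p.2, PySem.List.pyGetD words (p.1 + j) "")]) training_pairs) []

-- ===== PORT B =====
-- transliteration of Source B: contexts[i].append(x) is ctx.set i (ctx.getD i [] ++ [x]);
-- every index written is in range, so getD/set agree with Python's list indexing.
def build_training_pairs_alt (words : List String) (window_size : Int) : List (String × String) :=
  let n : Int := (words.length : Int)
  let contexts0 : List (List String) := List.replicate words.length []
  let contexts1 : List (List String) :=
    ((PySem.List.pyRange 1 (window_size + 1) 1).reverse).foldl (fun ctx d =>
      (PySem.List.pyRange d n 1).foldl (fun ctx i =>
        ctx.set i.toNat (ctx.getD i.toNat [] ++ [PySem.List.pyGetD words (i - d) ""])) ctx) contexts0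
  let contexts2 : List (List String) :=
    (PySem.List.pyRange 1 (window_size + 1) 1).foldl (fun ctx d =>
      (PySem.List.pyRange 0 (n - d) 1).foldl (fun ctx i =>
        ctx.set i.toNat (ctx.getD i.toNat [] ++ [PySem.List.pyGetD words (i + d) ""])) ctx) contexts1
  (PySem.List.pyRange 0 n 1).flatMap (fun i =>
    (contexts2.getD i.toNat []).map (fun c => (PySem.List.pyGetD words i "", c)))

-- ===== PRECONDITION & SPEC =====
def Spec_build_training_pairs (words : List String) (window_size : Int) (out : List (String × String)) : Prop := out = build_training_pairs_alt words window_size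
instance (words : List String) (window_size : Int) (out : List (String × String)) : Decidable (Spec_build_training_pairs words window_size out) := by unfold Spec_build_training_pairs; infer_instance

-- ===== CLAIM (what is proved, stated in full; the proofs are below) =====
def Claim_equal_build_training_pairs : Prop := ∀ (words : List String) (window_size : Int), Dom_build_training_pairs words window_size → Spec_build_training_pairs words window_size (build_training_pairs words window_size)

-- ===== LEMMAS AND PROOFS =====

-- range(a,b) filtered by a lower bound is a range
theorem pv_filter_pyRange_ge (a b lo : Int) :
    (PySem.List.pyRange a b 1).filter (fun j => decide (lo ≤ j)) = PySem.List.pyRange (max a lo) b 1 := by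
  obtain ⟨n, hn⟩ : ∃ n : Nat, b - a ≤ n := ⟨(b - a).toNat, Int.self_le_toNat _⟩
  induction n generalizing a with
  | zero =>
      rw [PySem.List.pyRange_one_eq_nil (by omega), PySem.List.pyRange_one_eq_nil (by omega)]
      rfl
  | succ n ih =>
      by_cases h : b ≤ a
      · rw [PySem.List.pyRange_one_eq_nil h, PySem.List.pyRange_one_eq_nil (by omega)]; rfl
      · rw [PySem.List.pyRange_one_cons (by omega), List.filter_cons, ih (a + 1) (by omega)]
        by_cases hlo : lo ≤ a
        · have h1 : max (a + 1) lo = a + 1 := by omega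
          have h2 : max a lo = a := by omega
          rw [h1, h2, if_pos (by simpa using hlo), ← PySem.List.pyRange_one_cons (by omega)]
        · have h1 : max (a + 1) lo = max a lo := by omega
          rw [h1, if_neg (by simpa using hlo)]

-- range(a,b) filtered by an upper bound is a range
theorem pv_filter_pyRange_lt (a b hi : Int) :
    (PySem.List.pyRange a b 1).filter (fun j => decide (j < hi)) = PySem.List.pyRange a (min b hi) 1 := by
  obtain ⟨n, hn⟩ : ∃ n : Nat, b - a ≤ n := ⟨(b - a).toNat, Int.self_le_toNat _⟩
  induction n generalizing a with
  | zero =>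
      rw [PySem.List.pyRange_one_eq_nil (by omega), PySem.List.pyRange_one_eq_nil (by omega)]
      rfl
  | succ n ih =>
      by_cases h : b ≤ a
      · rw [PySem.List.pyRange_one_eq_nil h, PySem.List.pyRange_one_eq_nil (by omega)]; rfl
      · rw [PySem.List.pyRange_one_cons (by omega), List.filter_cons, ih (a + 1) (by omega)]
        by_cases hhi : a < hi
        · rw [if_pos (by simpa using hhi), ← PySem.List.pyRange_one_cons (by omega)]
        · rw [if_neg (by simpa using hhi), PySem.List.pyRange_one_eq_nil (by omega),
              PySem.List.pyRange_one_eq_nil (by omega)]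

-- shifting a range
theorem pv_pyRange_map_add (c a b : Int) :
    (PySem.List.pyRange a b 1).map (fun j => c + j) = PySem.List.pyRange (c + a) (c + b) 1 := by
  rw [PySem.List.pyRange_one, PySem.List.pyRange_one, List.map_map]
  have h1 : c + b - (c + a) = b - a := by ring
  rw [h1]
  apply List.map_congr_left
  intro k _
  simp only [Function.comp_apply]
  ring

-- reversing a range and subtracting from a constant is a range
theorem pv_reverse_map_sub (c : Int) : ∀ (a b : Int),
    ((PySem.List.pyRange a b 1).reverse).map (fun d => c - d) = PySem.List.pyRange (c - b + 1) (c - a + 1) 1 := by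
  intro a b
  obtain ⟨n, hn⟩ : ∃ n : Nat, b - a ≤ n := ⟨(b - a).toNat, Int.self_le_toNat _⟩
  induction n generalizing a with
  | zero =>
      rw [PySem.List.pyRange_one_eq_nil (by omega), PySem.List.pyRange_one_eq_nil (by omega)]
      rfl
  | succ n ih =>
      by_cases h : b ≤ a
      · rw [PySem.List.pyRange_one_eq_nil h, PySem.List.pyRange_one_eq_nil (by omega)]; rfl
      · rw [PySem.List.pyRange_one_cons (by omega), List.reverse_cons, List.map_append,
            ih (a + 1) (by omega)]
        have h1 : c - (a + 1) + 1 = c - a := by ring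
        rw [h1]
        have h2 : PySem.List.pyRange (c - b + 1) (c - a + 1) 1
            = PySem.List.pyRange (c - b + 1) ((c - a) + 1) 1 := by ring_nf
        rw [h2, PySem.List.pyRange_one_succ_right (by omega)]
        rfl

theorem pv_flatMap_congr {α β : Type} (l : List α) (f g : α → List β)
    (h : ∀ x ∈ l, f x = g x) : l.flatMap f = l.flatMap g := by
  induction l with
  | nil => rfl
  | cons x xs ih =>
      simp only [List.flatMap_cons]
      rw [h x (by simp), ih (fun y hy => h y (by simp [hy]))]

theorem pv_getD_set (l : List (List String)) (m : Nat) (v : List String) (k : Nat) :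
    (l.set m v).getD k [] = if k = m ∧ m < l.length then v else l.getD k [] := by
  simp only [List.getD_eq_getElem?_getD, List.getElem?_set]
  split_ifs with h1 h2 h3 h4 <;> simp_all

-- one sweep 'for i in range(a,b): ctx[i].append(f i)' appends f k to bucket k iff a ≤ k < b
theorem pv_inner_fold (f : Int → String) (b : Int) (L : Nat) : ∀ (a : Int) (ctx : List (List String)),
    0 ≤ a → b ≤ (L : Int) → ctx.length = L →
    ((PySem.List.pyRange a b 1).foldl (fun c i =>
        c.set i.toNat (c.getD i.toNat [] ++ [f i])) ctx).length = L ∧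
    ∀ k : Nat, ((PySem.List.pyRange a b 1).foldl (fun c i =>
        c.set i.toNat (c.getD i.toNat [] ++ [f i])) ctx).getD k []
      = ctx.getD k [] ++ (if a ≤ (k : Int) ∧ (k : Int) < b then [f (k : Int)] else []) := by
  intro a ctx ha hb hctx
  obtain ⟨n, hn⟩ : ∃ n : Nat, b - a ≤ n := ⟨(b - a).toNat, Int.self_le_toNat _⟩
  induction n generalizing a ctx with
  | zero =>
      rw [PySem.List.pyRange_one_eq_nil (by omega)]
      refine ⟨hctx, fun k => ?_⟩
      rw [if_neg (by omega)]
      simp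
  | succ n ih =>
      by_cases h : b ≤ a
      · rw [PySem.List.pyRange_one_eq_nil h]
        refine ⟨hctx, fun k => ?_⟩
        rw [if_neg (by omega)]
        simp
      · rw [PySem.List.pyRange_one_cons (by omega), List.foldl_cons]
        have hlen : (ctx.set a.toNat (ctx.getD a.toNat [] ++ [f a])).length = L := by
          rw [List.length_set]; exact hctx
        obtain ⟨ihlen, ihget⟩ := ih (a + 1) (ctx.set a.toNat (ctx.getD a.toNat [] ++ [f a]))
          (by omega) hlen (by omega)
        refine ⟨ihlen, fun k => ?_⟩
        rw [ihget k, pv_getD_set]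
        have haN : a.toNat < ctx.length := by omega
        by_cases hk : (k : Int) = a
        · have hk' : k = a.toNat := by omega
          rw [if_pos ⟨hk', haN⟩, if_neg (by omega), if_pos (by omega), ← hk', hk]
          simp
        · have hk' : ¬(k = a.toNat ∧ a.toNat < ctx.length) := by
            rintro ⟨h1, _⟩; omega
          rw [if_neg hk']
          by_cases hcond : a + 1 ≤ (k : Int) ∧ (k : Int) < b
          · rw [if_pos hcond, if_pos (by omega)]
          · rw [if_neg hcond, if_neg (by omega)]

-- the distance-major double loop, bucket by bucket
theorem pv_outer_fold (lo hi : Int → Int) (f : Int → Int → String) (L : Nat) : ∀ (ds : List Int)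
    (ctx : List (List String)), (∀ d ∈ ds, 0 ≤ lo d) → (∀ d ∈ ds, hi d ≤ (L : Int)) →
    ctx.length = L →
    (ds.foldl (fun c d => (PySem.List.pyRange (lo d) (hi d) 1).foldl (fun c i =>
        c.set i.toNat (c.getD i.toNat [] ++ [f d i])) c) ctx).length = L ∧
    ∀ k : Nat, (ds.foldl (fun c d => (PySem.List.pyRange (lo d) (hi d) 1).foldl (fun c i =>
        c.set i.toNat (c.getD i.toNat [] ++ [f d i])) c) ctx).getD k []
      = ctx.getD k [] ++ (ds.filter (fun d => decide (lo d ≤ (k : Int) ∧ (k : Int) < hi d))).map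
          (fun d => f d (k : Int)) := by
  intro ds
  induction ds with
  | nil => intro ctx _ _ hctx; exact ⟨hctx, fun k => by simp⟩
  | cons d ds ih =>
      intro ctx hlo hhi hctx
      rw [List.foldl_cons]
      obtain ⟨ilen, iget⟩ := pv_inner_fold (f d) (hi d) L (lo d) ctx
        (hlo d (by simp)) (hhi d (by simp)) hctx
      obtain ⟨olen, oget⟩ := ih _ (fun e he => hlo e (by simp [he]))
        (fun e he => hhi e (by simp [he])) ilen
      refine ⟨olen, fun k => ?_⟩
      rw [oget k, iget k, List.filter_cons]
      by_cases hc : lo d ≤ (k : Int) ∧ (k : Int) < hi d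
      · simp [hc, List.append_assoc]
      · simp [hc]

-- after the two sweep phases, bucket k holds exactly the clipped window around k
theorem pv_bucket (words : List String) (w : Int) (k : Nat) (hk : k < words.length) :
    ((PySem.List.pyRange 1 (w + 1) 1).foldl (fun ctx d =>
      (PySem.List.pyRange 0 ((words.length : Int) - d) 1).foldl (fun ctx i =>
        ctx.set i.toNat (ctx.getD i.toNat [] ++ [PySem.List.pyGetD words (i + d) ""])) ctx)
      (((PySem.List.pyRange 1 (w + 1) 1).reverse).foldl (fun ctx d =>
        (PySem.List.pyRange d (words.length : Int) 1).foldl (fun ctx i =>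
          ctx.set i.toNat (ctx.getD i.toNat [] ++ [PySem.List.pyGetD words (i - d) ""])) ctx)
        (List.replicate words.length []))).getD k []
    = (PySem.List.pyRange (max 0 ((k : Int) - w)) (k : Int) 1 ++
       PySem.List.pyRange ((k : Int) + 1) (min ((k : Int) + w + 1) (words.length : Int)) 1).map
        (fun m => PySem.List.pyGetD words m "") := by
  have hrep : (List.replicate words.length ([] : List String)).length = words.length := by simp
  obtain ⟨len1, get1⟩ := pv_outer_fold (fun d => d) (fun _ => (words.length : Int))
    (fun d i => PySem.List.pyGetD words (i - d) "") words.length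
    ((PySem.List.pyRange 1 (w + 1) 1).reverse) (List.replicate words.length [])
    (fun d hd => by
      rw [List.mem_reverse, PySem.List.mem_pyRange_one] at hd
      show (0 : Int) ≤ d; omega)
    (fun d _ => le_refl _) hrep
  obtain ⟨len2, get2⟩ := pv_outer_fold (fun _ => 0) (fun d => (words.length : Int) - d)
    (fun d i => PySem.List.pyGetD words (i + d) "") words.length
    (PySem.List.pyRange 1 (w + 1) 1) _
    (fun d _ => le_refl 0)
    (fun d hd => by
      rw [PySem.List.mem_pyRange_one] at hd
      show (words.length : Int) - d ≤ (words.length : Int); omega) len1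
  rw [get2 k, get1 k]
  have hrepk : (List.replicate words.length ([] : List String)).getD k [] = [] := by
    simp [List.getD_eq_getElem?_getD, hk]
  rw [hrepk, List.nil_append]
  -- left phase: descending distances give ascending left-context indices
  have hleft : ((PySem.List.pyRange 1 (w + 1) 1).reverse.filter
        (fun d => decide (d ≤ (k : Int) ∧ (k : Int) < (words.length : Int)))).map
        (fun d => PySem.List.pyGetD words ((k : Int) - d) "")
      = (PySem.List.pyRange (max 0 ((k : Int) - w)) (k : Int) 1).map
        (fun m => PySem.List.pyGetD words m "") := by
    rw [List.filter_reverse,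
        List.filter_congr (q := fun d => decide (d < (k : Int) + 1))
          (by intro d hd; simp only [decide_eq_decide]; omega),
        pv_filter_pyRange_lt]
    have hmm : (fun d => PySem.List.pyGetD words ((k : Int) - d) "")
        = (fun m => PySem.List.pyGetD words m "") ∘ (fun d => (k : Int) - d) := rfl
    rw [hmm, ← List.map_map, pv_reverse_map_sub]
    have e1 : (k : Int) - min (w + 1) ((k : Int) + 1) + 1 = max 0 ((k : Int) - w) := by omega
    have e2 : (k : Int) - 1 + 1 = (k : Int) := by ring
    rw [e1, e2]
  -- right phase: ascending distances give ascending right-context indices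
  have hright : ((PySem.List.pyRange 1 (w + 1) 1).filter
        (fun d => decide ((0 : Int) ≤ (k : Int) ∧ (k : Int) < (words.length : Int) - d))).map
        (fun d => PySem.List.pyGetD words ((k : Int) + d) "")
      = (PySem.List.pyRange ((k : Int) + 1) (min ((k : Int) + w + 1) (words.length : Int)) 1).map
        (fun m => PySem.List.pyGetD words m "") := by
    rw [List.filter_congr (q := fun d => decide (d < (words.length : Int) - (k : Int)))
          (by intro d hd; simp only [decide_eq_decide]; omega),
        pv_filter_pyRange_lt]
    have hmm : (fun d => PySem.List.pyGetD words ((k : Int) + d) "")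
        = (fun m => PySem.List.pyGetD words m "") ∘ (fun d => (k : Int) + d) := rfl
    rw [hmm, ← List.map_map, pv_pyRange_map_add]
    have e1 : (k : Int) + min (w + 1) ((words.length : Int) - (k : Int))
        = min ((k : Int) + w + 1) (words.length : Int) := by omega
    rw [e1]
  rw [hleft, hright, List.map_append]

-- the inner loop of A, for a fixed in-range target index, is the clipped-window map
theorem pv_A_inner (words : List String) (w : Int) (k : Nat) (hk : k < words.length) (t : String) :
    ((PySem.List.pyRange (-w) (w + 1) 1).filter
        (fun j => decide (¬(j = 0 ∨ (k : Int) + j < 0 ∨ (words.length : Int) ≤ (k : Int) + j)))).map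
      (fun j => (t, PySem.List.pyGetD words ((k : Int) + j) "")) =
    (PySem.List.pyRange (max 0 ((k : Int) - w)) (k : Int) 1 ++
     PySem.List.pyRange ((k : Int) + 1) (min ((k : Int) + w + 1) (words.length : Int)) 1).map
      (fun m => (t, PySem.List.pyGetD words m "")) := by
  have shift : ∀ (A B : Int),
      (PySem.List.pyRange A B 1).map (fun j => (t, PySem.List.pyGetD words ((k : Int) + j) "")) =
      (PySem.List.pyRange ((k : Int) + A) ((k : Int) + B) 1).map
        (fun m => (t, PySem.List.pyGetD words m "")) := by
    intro A B
    rw [← pv_pyRange_map_add (k : Int) A B, List.map_map]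
    rfl
  by_cases hw : w < 0
  · rw [PySem.List.pyRange_one_eq_nil (by omega : w + 1 ≤ -w),
        PySem.List.pyRange_one_eq_nil (by omega : (k : Int) ≤ max 0 ((k : Int) - w)),
        PySem.List.pyRange_one_eq_nil (by omega : min ((k : Int) + w + 1) (words.length : Int) ≤ (k : Int) + 1)]
    rfl
  · rw [not_lt] at hw
    rw [PySem.List.pyRange_one_append (-w) 0 (w + 1) (by omega) (by omega),
        PySem.List.pyRange_one_cons (by omega : (0 : Int) < w + 1),
        List.filter_append, List.filter_cons, if_neg (by simp), zero_add]
    have hleft : (PySem.List.pyRange (-w) 0 1).filter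
        (fun j => decide (¬(j = 0 ∨ (k : Int) + j < 0 ∨ (words.length : Int) ≤ (k : Int) + j))) =
        PySem.List.pyRange (max (-w) (-(k : Int))) 0 1 := by
      rw [List.filter_congr (q := fun j => decide (-(k : Int) ≤ j)) ?_, pv_filter_pyRange_ge]
      intro j hj
      rw [PySem.List.mem_pyRange_one] at hj
      simp only [decide_eq_decide]
      omega
    have hright : (PySem.List.pyRange 1 (w + 1) 1).filter
        (fun j => decide (¬(j = 0 ∨ (k : Int) + j < 0 ∨ (words.length : Int) ≤ (k : Int) + j))) =
        PySem.List.pyRange 1 (min (w + 1) ((words.length : Int) - (k : Int))) 1 := by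
      rw [List.filter_congr (q := fun j => decide (j < (words.length : Int) - (k : Int))) ?_,
          pv_filter_pyRange_lt]
      intro j hj
      rw [PySem.List.mem_pyRange_one] at hj
      simp only [decide_eq_decide]
      omega
    rw [hleft, hright, List.map_append, shift, shift]
    have e1 : (k : Int) + max (-w) (-(k : Int)) = max 0 ((k : Int) - w) := by omega
    have e2 : (k : Int) + 0 = (k : Int) := by ring
    have e4 : (k : Int) + min (w + 1) ((words.length : Int) - (k : Int)) =
        min ((k : Int) + w + 1) (words.length : Int) := by omega
    rw [e1, e2, e4, List.map_append]

-- ===== VERDICT (by name: the statement is the Claim_ definition above) =====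
theorem build_training_pairs_spec : Claim_equal_build_training_pairs := by
  intro words w _
  unfold Spec_build_training_pairs build_training_pairs build_training_pairs_alt
  simp only []
  -- A side: turn the guarded append loop into a flatMap of filtered window offsets
  have inner_eq : ∀ (acc : List (String × String)) (p : Int × String),
      (PySem.List.pyRange (-w) (w + 1) 1).foldl (fun tp j =>
        if j = 0 ∨ p.1 + j < 0 ∨ (words.length : Int) ≤ p.1 + j then tp
        else tp ++ [(p.2, PySem.List.pyGetD words (p.1 + j) "")]) acc =
      acc ++ ((PySem.List.pyRange (-w) (w + 1) 1).filter
          (fun j => decide (¬(j = 0 ∨ p.1 + j < 0 ∨ (words.length : Int) ≤ p.1 + j)))).map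
        (fun j => (p.2, PySem.List.pyGetD words (p.1 + j) "")) := by
    intro acc p
    have hfun : (fun (tp : List (String × String)) (j : Int) =>
        if j = 0 ∨ p.1 + j < 0 ∨ (words.length : Int) ≤ p.1 + j then tp
        else tp ++ [(p.2, PySem.List.pyGetD words (p.1 + j) "")]) =
        (fun tp j =>
          if ¬(j = 0 ∨ p.1 + j < 0 ∨ (words.length : Int) ≤ p.1 + j) then
            tp ++ [(p.2, PySem.List.pyGetD words (p.1 + j) "")] else tp) := by
      funext tp j
      rw [ite_not]
    rw [hfun, PySem.List.foldl_append_ite]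
  simp only [inner_eq]
  rw [PySem.List.foldl_append_eq_flatMap, List.nil_append,
      PySem.List.enumerate_eq_map_pyRange words "", List.flatMap_map]
  simp only [PySem.List.len_eq]
  apply pv_flatMap_congr
  intro j hj
  rw [PySem.List.mem_pyRange_one] at hj
  obtain ⟨k, rfl⟩ := Int.eq_ofNat_of_zero_le hj.1
  have hk : k < words.length := by omega
  have htoNat : ((k : Int)).toNat = k := by omega
  rw [htoNat, pv_bucket words w k hk, pv_A_inner words w k hk, List.map_map]
  rfl
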